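-- pv_equiv track=rewrite | github.com/MrBrantCode/unitest_baseline | mut_generate/mist_train_cf/cf_60999/solution.py | find_twin_primes
-- ===== SOURCE A (Python) =====
-- def find_twin_primes(n):
--     """
--     This function finds all twin prime pairs within the range from 2 to `n`.
--
--     Args:
--     n (int): The upper limit of the range.
--
--     Returns:
--     list: A list of tuples, each containing a twin prime pair.
--
--     """
--     def sieve(n):
--         # Create a boolean array "is_prime[0..n]" and initialize all entries as True.
--         # A value in is_prime[i] will finally be False if i is Not a prime, True otherwise.
--         is_prime = [True for i in range(n+1)]
--         p = 2
--         while(p * p <= n):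
--             # If is_prime[p] is not changed, then it is a prime
--             if (is_prime[p] == True):
--                 # Update all multiples of p
--                 for i in range(p * p, n+1, p):
--                     is_prime[i] = False
--             p += 1
--         return is_prime
--
--     primes = sieve(n)
--     twin_primes = []
--     for i in range(2, len(primes)-2):
--         if primes[i] and primes[i + 2]:
--             twin_primes.append((i, i+2))
--     return twin_primes
-- ===== SOURCE B (Python) =====
-- def find_twin_primes(n):
--     """
--     This function finds all twin prime pairs within the range from 2 to `n`.
--
--     Args:
--     n (int): The upper limit of the range.
--
--     Returns:
--     list: A list of tuples, each containing a twin prime pair.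
--
--     """
--     limit = n + 1
--     flags = [True] * limit
--     for p in range(2, limit):
--         if p * p < limit and flags[p]:
--             flags[p * p::p] = [False] * len(range(p * p, limit, p))
--     primes = [i for i in range(2, limit) if flags[i]]
--     return [(p, q) for p, q in zip(primes, primes[1:]) if q - p == 2]
-- ===== Notes on version B (the rewrite author's own statement) =====
-- stated objective: alternative
-- what changed: B replaces A's fuel-style while loop with in-place single-index marking and A's integer-index twin scan (testing flags at i and i+2) by a for-loop sieve that clears each prime's multiples with one slice assignment, then materialises the prime list and emits twins by zipping the prime list with its own tail and keeping adjacent pairs at gap 2.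
import Mathlib
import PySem

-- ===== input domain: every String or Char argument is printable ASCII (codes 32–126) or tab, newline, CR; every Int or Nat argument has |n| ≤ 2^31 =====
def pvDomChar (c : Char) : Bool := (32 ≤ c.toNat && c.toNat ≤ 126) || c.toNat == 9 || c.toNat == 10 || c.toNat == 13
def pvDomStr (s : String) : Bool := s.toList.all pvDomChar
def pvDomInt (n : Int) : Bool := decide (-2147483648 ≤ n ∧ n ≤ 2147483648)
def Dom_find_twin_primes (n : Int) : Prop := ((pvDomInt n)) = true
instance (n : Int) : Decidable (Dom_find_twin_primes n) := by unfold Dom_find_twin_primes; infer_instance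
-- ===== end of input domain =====

-- B sieves with a for-loop over all candidate p, clearing each prime's multiples with one
-- slice assignment, then finds twins by zipping the materialised prime list with its own tail
-- (gap = 2), instead of A's while-driven per-index marking and index scan testing i and i+2.
-- Equivalence of the RETURN values is proved for every n (both functions are total).

-- ===== PORT A =====
-- inner while loop of A's sieve: p advances while p*p <= n
-- (fuel is only a structural bound on the number of iterations; the loop always
-- stops via the guard first, since p*p ≤ n forces p ≤ n)
def sieveLoopA (n : Int) (fuel : Nat) (p : Int) (is_prime : List Bool) : List Bool :=
  match fuel with
  | 0 => is_prime
  | Nat.succ fuel =>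
    if p * p ≤ n then
      sieveLoopA n fuel (p + 1)
        (if PySem.List.pyGetD is_prime p true = true then
          -- for i in range(p*p, n+1, p): is_prime[i] = False   (index i is provably in range)
          (PySem.List.pyRange (p * p) (n + 1) p).foldl (fun l i => l.set i.toNat false) is_prime
        else is_prime)
    else is_prime

def find_twin_primes (n : Int) : List (Int × Int) :=
  let primes := sieveLoopA n (n + 1).toNat 2 ((PySem.List.pyRange 0 (n + 1)).map (fun _ => true))
  (PySem.List.pyRange 2 ((primes.length : Int) - 2)).foldl
    (fun acc i =>
      if PySem.List.pyGetD primes i false && PySem.List.pyGetD primes (i + 2) false then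
        acc ++ [(i, i + 2)]
      else acc) []

-- ===== PORT B =====
-- 'for p in range(2, limit): if p*p < limit and flags[p]: flags[p*p::p] = [False]*…':
-- a foldl over the range, whose body is the Python slice assignment ported EXACTLY by hand:
-- it sets every index k of flags with p*p ≤ k and (k - p*p) % p == 0 to False (these are
-- precisely the slice positions p*p, p*p+p, …; mapIdx rewrites each value at its index).
def find_twin_primes_alt (n : Int) : List (Int × Int) :=
  let limit : Int := n + 1
  let flags :=
    (PySem.List.pyRange 2 limit).foldl
      (fun fl p =>
        if decide (p * p < limit) && PySem.List.pyGetD fl p true then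
          fl.mapIdx (fun k v =>
            if decide (p * p ≤ (k : Int)) && (PySem.Int.mod ((k : Int) - p * p) p == 0) then false
            else v)
        else fl)
      (PySem.List.pyRepeat [true] limit)
  -- primes = [i for i in range(2, limit) if flags[i]]
  let primes := (PySem.List.pyRange 2 limit).filter (fun i => PySem.List.pyGetD flags i false)
  -- [(p, q) for p, q in zip(primes, primes[1:]) if q - p == 2]
  ((primes.zip (PySem.List.slice primes (some 1) none)).filter
      (fun pq => pq.2 - pq.1 == 2)).map (fun pq => (pq.1, pq.2))

-- ===== PRECONDITION & SPEC =====
def Spec_find_twin_primes (n : Int) (out : List (Int × Int)) : Prop := out = find_twin_primes_alt n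
instance (n : Int) (out : List (Int × Int)) : Decidable (Spec_find_twin_primes n out) := by unfold Spec_find_twin_primes; infer_instance

-- ===== CLAIM (what is proved, stated in full; the proofs are below) =====
def Claim_equal_find_twin_primes : Prop := ∀ (n : Int), Dom_find_twin_primes n → Spec_find_twin_primes n (find_twin_primes n)

-- ===== LEMMAS AND PROOFS =====

-- adjacent-pair twin extraction of B, in filter form
def adjTwins (P : List Int) : List (Int × Int) :=
  (P.zip P.tail).filter (fun pq => pq.2 - pq.1 == 2)

lemma adjTwins_cons (a : Int) (T : List Int) :
    adjTwins (a :: T) =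
      (match T.head? with
        | some q => if q - a == 2 then [(a, q)] else []
        | none => []) ++ adjTwins T := by
  cases T with
  | nil => rfl
  | cons q T' =>
    simp only [adjTwins, List.tail_cons, List.zip_cons_cons, List.filter_cons, List.head?_cons]
    split <;> simp

-- foldl over set-to-false at a list of nonnegative indices, pointwise
lemma foldl_set_getElem? (is : List Int) (l : List Bool) (k : Nat)
    (h0 : ∀ i ∈ is, 0 ≤ i) :
    (is.foldl (fun l i => l.set i.toNat false) l)[k]? =
      if (k : Int) ∈ is then l[k]?.map (fun _ => false) else l[k]? := by
  induction is generalizing l with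
  | nil => simp
  | cons i is ih =>
    have hi : 0 ≤ i := h0 i (List.mem_cons_self ..)
    have h0' : ∀ j ∈ is, 0 ≤ j := fun j hj => h0 j (List.mem_cons_of_mem _ hj)
    rw [List.foldl_cons, ih _ h0']
    by_cases hmem2 : (k : Int) ∈ is
    · rw [if_pos hmem2, if_pos (List.mem_cons_of_mem _ hmem2), List.getElem?_set]
      by_cases hik : i.toNat = k
      · rw [if_pos hik]
        by_cases hk : i.toNat < l.length
        · rw [if_pos hk, List.getElem?_eq_getElem (show k < l.length by omega)]
          all_goals rfl
        · rw [if_neg hk, List.getElem?_eq_none (by omega)]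
      · rw [if_neg hik]
    · rw [if_neg hmem2]
      by_cases hik : i.toNat = k
      · rw [if_pos (List.mem_cons.mpr (Or.inl (by omega))), List.getElem?_set, if_pos hik]
        by_cases hk : i.toNat < l.length
        · rw [if_pos hk, List.getElem?_eq_getElem (show k < l.length by omega)]
          all_goals rfl
        · rw [if_neg hk, List.getElem?_eq_none (by omega)]
          all_goals rfl
      · rw [if_neg (show ¬ (k:Int) ∈ i :: is by
              simp only [List.mem_cons, hmem2, or_false]; omega),
            List.getElem?_set, if_neg hik]

lemma foldl_set_length (is : List Int) (l : List Bool) :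
    (is.foldl (fun l i => l.set i.toNat false) l).length = l.length := by
  induction is generalizing l with
  | nil => rfl
  | cons i is ih => simp [ih]

lemma sieveLoopA_succ (n : Int) (fuel : Nat) (p : Int) (F : List Bool) :
    sieveLoopA n (fuel + 1) p F =
      if p * p ≤ n then
        sieveLoopA n fuel (p + 1)
          (if PySem.List.pyGetD F p true = true then
            (PySem.List.pyRange (p * p) (n + 1) p).foldl (fun l i => l.set i.toNat false) F
          else F)
      else F := rfl

lemma sieveLoopA_stop (n : Int) (fuel : Nat) (p : Int) (F : List Bool) (h : ¬ p * p ≤ n) :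
    sieveLoopA n fuel p F = F := by
  cases fuel with
  | zero => rfl
  | succ fuel => rw [sieveLoopA_succ, if_neg h]

lemma sieveLoopA_length (n : Int) (fuel : Nat) (p : Int) (F : List Bool) :
    (sieveLoopA n fuel p F).length = F.length := by
  induction fuel generalizing p F with
  | zero => rfl
  | succ fuel ih =>
    rw [sieveLoopA_succ]
    split
    · rw [ih]
      split
      · rw [foldl_set_length]
      · rfl
    · rfl

-- B's marking step (the ported slice assignment)
def markB (limit p : Int) (fl : List Bool) : List Bool :=
  if decide (p * p < limit) && PySem.List.pyGetD fl p true then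
    fl.mapIdx (fun k v =>
      if decide (p * p ≤ (k : Int)) && (PySem.Int.mod ((k : Int) - p * p) p == 0) then false
      else v)
  else fl

-- A's destructive multiple-marking equals B's slice-assignment rebuild, as whole lists
lemma markEq (n p : Int) (F : List Bool) (hp : 2 ≤ p) (hlen : (F.length : Int) ≤ n + 1) :
    (PySem.List.pyRange (p * p) (n + 1) p).foldl (fun l i => l.set i.toNat false) F =
      F.mapIdx (fun k v =>
        if decide (p * p ≤ (k : Int)) && (PySem.Int.mod ((k : Int) - p * p) p == 0) then false
        else v) := by
  have hp0 : (0 : Int) < p := by omega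
  apply List.ext_getElem?
  intro k
  rw [List.getElem?_mapIdx,
    foldl_set_getElem? _ _ _ (fun i hi => by
      rcases (PySem.List.mem_pyRange_iff_of_pos hp0 i).mp hi with ⟨h1, -, -⟩
      nlinarith)]
  cases hF : F[k]? with
  | none => split <;> rfl
  | some v =>
    have hk : k < F.length := List.getElem?_eq_some_iff.mp hF |>.choose
    have hkn : (k : Int) < n + 1 := by
      have := (Int.ofNat_lt).mpr hk
      omega
    by_cases hc : p * p ≤ (k : Int) ∧ p ∣ ((k : Int) - p * p)
    · rw [if_pos ((PySem.List.mem_pyRange_iff_of_pos hp0 _).mpr ⟨hc.1, hkn, hc.2⟩)]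
      simp only [Option.map_some]
      congr 1
      rw [if_pos]
      simp only [Bool.and_eq_true, decide_eq_true_eq, beq_iff_eq]
      refine ⟨by simpa using hc.1, ?_⟩
      rw [PySem.Int.mod_eq_zero_iff_dvd]
      simpa using hc.2
    · rw [if_neg (fun hmem => hc (by
        rcases (PySem.List.mem_pyRange_iff_of_pos hp0 _).mp hmem with ⟨h1, -, h3⟩
        exact ⟨h1, h3⟩))]
      simp only [Option.map_some]
      congr 1
      rw [if_neg]
      simp only [Bool.and_eq_true, decide_eq_true_eq, beq_iff_eq, not_and]
      intro h1 h2
      exact hc ⟨by simpa using h1, by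
        rw [← PySem.Int.mod_eq_zero_iff_dvd]
        simpa using h2⟩

-- once p*p exceeds n, B's remaining fold steps are all no-ops
lemma foldB_id (n : Int) : ∀ (m : Nat) (a : Int) (F : List Bool),
    (n + 1 - a).toNat ≤ m → 2 ≤ a → n < a * a →
    (PySem.List.pyRange a (n + 1)).foldl (fun fl p => markB (n + 1) p fl) F = F := by
  intro m
  induction m with
  | zero =>
    intro a F hm ha hsq
    rw [PySem.List.pyRange_one_eq_nil (by omega), List.foldl_nil]
  | succ m ih =>
    intro a F hm ha hsq
    by_cases hend : n + 1 ≤ a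
    · rw [PySem.List.pyRange_one_eq_nil (by omega), List.foldl_nil]
    · rw [PySem.List.pyRange_one_cons (by omega), List.foldl_cons]
      have hg : markB (n + 1) a F = F := by
        unfold markB
        rw [if_neg (by simp only [Bool.and_eq_true, decide_eq_true_eq, not_and]; omega)]
      rw [hg]
      exact ih (a + 1) F (by omega) (by omega) (by nlinarith)

-- A's while loop equals B's fold over the whole candidate range
lemma loopEq (n : Int) : ∀ (m : Nat) (a : Int) (fuel : Nat) (F : List Bool),
    (n + 1 - a).toNat ≤ m → (n + 1 - a).toNat ≤ fuel → 2 ≤ a → (F.length : Int) = n + 1 →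
    sieveLoopA n fuel a F = (PySem.List.pyRange a (n + 1)).foldl (fun fl p => markB (n + 1) p fl) F := by
  intro m
  induction m with
  | zero =>
    intro a fuel F hm hfuel ha hlen
    rw [PySem.List.pyRange_one_eq_nil (by omega),
      sieveLoopA_stop n fuel a F (by intro hle; have h1 : n + 1 ≤ a := (by omega); nlinarith [mul_self_nonneg (a - 1)]), List.foldl_nil]
  | succ m ih =>
    intro a fuel F hm hfuel ha hlen
    by_cases hend : n + 1 ≤ a
    · rw [PySem.List.pyRange_one_eq_nil (by omega),
        sieveLoopA_stop n fuel a F (by nlinarith), List.foldl_nil]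
    · rw [PySem.List.pyRange_one_cons (by omega), List.foldl_cons]
      by_cases hsq : a * a ≤ n
      · -- active step: both mark (or both skip), then continue
        obtain ⟨fuel', rfl⟩ : ∃ f', fuel = f' + 1 := ⟨fuel - 1, by omega⟩
        rw [sieveLoopA_succ, if_pos hsq]
        have hstep : (if PySem.List.pyGetD F a true = true then
              (PySem.List.pyRange (a * a) (n + 1) a).foldl (fun l i => l.set i.toNat false) F
            else F) = markB (n + 1) a F := by
          unfold markB
          by_cases hf : PySem.List.pyGetD F a true = true
          · rw [if_pos hf, if_pos (by
              simp only [Bool.and_eq_true, decide_eq_true_eq]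
              exact ⟨by omega, hf⟩)]
            exact markEq n a F ha (by omega)
          · rw [if_neg hf, if_neg (by
              simp only [Bool.and_eq_true, decide_eq_true_eq, not_and]
              intro _; simpa using hf)]
        rw [hstep]
        apply ih (a + 1) fuel' (markB (n + 1) a F) (by omega) (by omega) (by omega)
        unfold markB
        split
        · rw [List.length_mapIdx, hlen]
        · exact hlen
      · -- A stops; B's remaining steps are all no-ops
        rw [sieveLoopA_stop n fuel a F (by omega)]
        have hg : markB (n + 1) a F = F := by
          unfold markB
          rw [if_neg (by simp only [Bool.and_eq_true, decide_eq_true_eq, not_and]; omega)]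
        rw [hg]
        exact (foldB_id n m (a + 1) F (by omega) (by omega) (by nlinarith)).symm

-- falseness is preserved by A's sieve loop
lemma sieveLoopA_mono (n : Int) (fuel : Nat) (p : Int) (F : List Bool) (k : Nat)
    (hp : 2 ≤ p) (h : F[k]? = some false) :
    (sieveLoopA n fuel p F)[k]? = some false := by
  induction fuel generalizing p F with
  | zero => exact h
  | succ fuel ih =>
    rw [sieveLoopA_succ]
    split
    · apply ih _ _ (by omega)
      split
      · rw [foldl_set_getElem? _ _ _ (fun i hi => by
          rcases (PySem.List.mem_pyRange_iff_of_pos (by omega : (0:Int) < p) i).mp hi with ⟨h1, -, -⟩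
          nlinarith)]
        split <;> simp [h]
      · exact h
    · exact h

-- after the sieve, every even position 4 ≤ k ≤ n is false
lemma sieve_even_false (n : Int) (hn : 4 ≤ n) (k : Nat)
    (h4 : 4 ≤ k) (hkn : (k : Int) ≤ n) (h2 : 2 ∣ k) :
    (sieveLoopA n (n + 1).toNat 2 (PySem.List.pyRepeat [true] (n + 1)))[k]? = some false := by
  rw [show (n + 1).toNat = n.toNat + 1 by omega, sieveLoopA_succ,
    if_pos (by omega : (2:Int) * 2 ≤ n)]
  rw [if_pos (by
    rw [PySem.List.pyGetD_of_nonneg _ _ (by omega)]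
    rw [PySem.List.pyRepeat_singleton]
    have : (2:Int).toNat = 2 := rfl
    rw [this, List.getD_eq_getElem?_getD, List.getElem?_replicate, if_pos (by omega)]
    rfl)]
  apply sieveLoopA_mono _ _ _ _ _ (by omega)
  rw [foldl_set_getElem? _ _ _ (fun i hi => by
    rcases (PySem.List.mem_pyRange_iff_of_pos (by omega : (0:Int) < 2) i).mp hi with ⟨h1, -, -⟩
    omega)]
  rw [if_pos (by
    rw [PySem.List.mem_pyRange_iff_of_pos (by omega : (0:Int) < 2)]
    refine ⟨by omega, by omega, by omega⟩)]
  rw [PySem.List.pyRepeat_singleton, List.getElem?_replicate, if_pos (by omega)]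
  rfl

-- main combinatorial lemma: A's index scan = B's adjacent-gap scan,
-- given that no three consecutive flags are set

def twinScan (f : Int → Bool) (n a : Int) : List (Int × Int) :=
  ((PySem.List.pyRange a (n - 1)).filter (fun i => f i && f (i + 2))).map (fun i => (i, i + 2))

def primesFrom (f : Int → Bool) (n a : Int) : List Int :=
  (PySem.List.pyRange a (n + 1)).filter f

lemma twinScan_skip (f : Int → Bool) (n a : Int)
    (h : ¬(a < n - 1 ∧ f a = true ∧ f (a + 2) = true)) :
    twinScan f n a = twinScan f n (a + 1) := by
  unfold twinScan
  by_cases hlt : a < n - 1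
  · rw [PySem.List.pyRange_one_cons hlt, List.filter_cons]
    have hc : (f a && f (a + 2)) = false := by
      cases h2 : f a <;> cases h3 : f (a + 2) <;> simp_all
    simp [hc]
  · rw [PySem.List.pyRange_one_eq_nil (by omega), PySem.List.pyRange_one_eq_nil (by omega)]

lemma twinScan_emit (f : Int → Bool) (n a : Int) (h1 : a < n - 1)
    (h2 : f a = true) (h3 : f (a + 2) = true) :
    twinScan f n a = (a, a + 2) :: twinScan f n (a + 1) := by
  unfold twinScan
  rw [PySem.List.pyRange_one_cons h1, List.filter_cons]
  simp [h2, h3]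

lemma primesFrom_cons (f : Int → Bool) (n a : Int) (ha : a ≤ n) :
    primesFrom f n a =
      if f a = true then a :: primesFrom f n (a + 1) else primesFrom f n (a + 1) := by
  unfold primesFrom
  rw [PySem.List.pyRange_one_cons (by omega : a < n + 1), List.filter_cons]

lemma scan_eq (f : Int → Bool) (n : Int)
    (H : ∀ i : Int, 2 ≤ i → f i = true → f (i + 1) = true → i + 2 ≤ n → f (i + 2) = false) :
    ∀ a : Int, 2 ≤ a → twinScan f n a = adjTwins (primesFrom f n a) := by
  have key : ∀ (m : Nat) (a : Int), (n + 1 - a).toNat ≤ m → 2 ≤ a →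
      twinScan f n a = adjTwins (primesFrom f n a) := by
    intro m
    induction m with
    | zero =>
      intro a hm ha
      unfold twinScan primesFrom
      rw [PySem.List.pyRange_one_eq_nil (by omega), PySem.List.pyRange_one_eq_nil (by omega)]
      rfl
    | succ m ih =>
      intro a hm ha
      by_cases hend : n + 1 ≤ a
      · unfold twinScan primesFrom
        rw [PySem.List.pyRange_one_eq_nil (by omega), PySem.List.pyRange_one_eq_nil (by omega)]
        rfl
      · by_cases hfa : f a = true
        · by_cases han : n ≤ a
          · -- a = n : single prime left, no pair on either side
            unfold twinScan primesFrom
            rw [PySem.List.pyRange_one_eq_nil (by omega)]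
            rw [PySem.List.pyRange_one_cons (by omega : a < n + 1),
              PySem.List.pyRange_one_eq_nil (by omega)]
            simp [adjTwins, hfa]
          · have hP : primesFrom f n a = a :: primesFrom f n (a + 1) := by
              rw [primesFrom_cons f n a (by omega), if_pos hfa]
            by_cases hfa1 : f (a + 1) = true
            · -- next prime is adjacent at distance 1: no pair emitted at a
              have hhead : (primesFrom f n (a + 1)).head? = some (a + 1) := by
                rw [primesFrom_cons f n (a + 1) (by omega), if_pos hfa1]
                rfl
              rw [hP, adjTwins_cons, hhead]
              have hne : a + 1 - a ≠ 2 := by omega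
              simp only [beq_iff_eq, hne, if_false, List.nil_append]
              rw [← ih (a + 1) (by omega) (by omega)]
              apply twinScan_skip
              rintro ⟨hlt, -, hfa2⟩
              rw [H a ha hfa hfa1 (by omega)] at hfa2
              exact Bool.noConfusion hfa2
            · by_cases han2 : n ≤ a + 1
              · -- a + 1 = n and f (a+1) = false : a is the last prime
                have hP2 : primesFrom f n (a + 1) = [] := by
                  rw [primesFrom_cons f n (a + 1) (by omega), if_neg hfa1]
                  unfold primesFrom
                  rw [PySem.List.pyRange_one_eq_nil (by omega)]
                  rfl
                rw [hP, hP2]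
                unfold twinScan
                rw [PySem.List.pyRange_one_eq_nil (by omega)]
                rfl
              · by_cases hfa2 : f (a + 2) = true
                · -- twin pair (a, a+2)
                  have hhead : (primesFrom f n (a + 1)).head? = some (a + 2) := by
                    rw [primesFrom_cons f n (a + 1) (by omega), if_neg hfa1,
                      show a + 1 + 1 = a + 2 by ring,
                      primesFrom_cons f n (a + 2) (by omega), if_pos hfa2]
                    rfl
                  rw [hP, adjTwins_cons, hhead]
                  have he : a + 2 - a = 2 := by omega
                  simp only [beq_iff_eq, he, if_true]
                  rw [twinScan_emit f n a (by omega) hfa hfa2,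
                    ih (a + 1) (by omega) (by omega)]
                  rfl
                · -- next prime (if any) is ≥ a+3 : no pair at a
                  have hT : primesFrom f n (a + 1) = primesFrom f n (a + 3) := by
                    rw [primesFrom_cons f n (a + 1) (by omega), if_neg hfa1,
                      show a + 1 + 1 = a + 2 by ring,
                      primesFrom_cons f n (a + 2) (by omega), if_neg hfa2,
                      show a + 2 + 1 = a + 3 by ring]
                  rw [hP, adjTwins_cons]
                  have hmatch : (match (primesFrom f n (a + 1)).head? with
                      | some q => if q - a == 2 then [(a, q)] else []
                      | none => []) = ([] : List (Int × Int)) := by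
                    rw [hT]
                    cases hq : (primesFrom f n (a + 3)).head? with
                    | none => rfl
                    | some q =>
                      have hqm : q ∈ primesFrom f n (a + 3) := List.mem_of_mem_head? hq
                      have hq3 : a + 3 ≤ q := by
                        unfold primesFrom at hqm
                        have := (List.mem_filter.mp hqm).1
                        rw [PySem.List.mem_pyRange_one] at this
                        omega
                      have hne : q - a ≠ 2 := by omega
                      simp [hne]
                  rw [hmatch, List.nil_append]
                  rw [← ih (a + 1) (by omega) (by omega)]
                  apply twinScan_skip
                  rintro ⟨-, -, h2⟩
                  rw [h2] at hfa2
                  exact hfa2 rfl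
        · -- a is not flagged: drop it on both sides
          have hP : primesFrom f n a = primesFrom f n (a + 1) := by
            rw [primesFrom_cons f n a (by omega), if_neg hfa]
          rw [hP, ← ih (a + 1) (by omega) (by omega)]
          apply twinScan_skip
          rintro ⟨-, h1, -⟩
          exact hfa h1
  intro a ha
  exact key (n + 1 - a).toNat a (le_refl _) ha

-- the two initial all-True arrays coincide
lemma init_eq (n : Int) :
    (PySem.List.pyRange 0 (n + 1)).map (fun _ => true) = PySem.List.pyRepeat [true] (n + 1) := by
  rw [PySem.List.pyRepeat_singleton, PySem.List.pyRange_one, List.map_map]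
  simp [List.map_const']

-- ===== VERDICT (by name: the statement is the Claim_ definition above) =====
theorem find_twin_primes_spec : Claim_equal_find_twin_primes := by
  intro n _
  unfold Spec_find_twin_primes find_twin_primes find_twin_primes_alt
  simp only [PySem.List.slice_from_one]
  by_cases hn : n ≤ 1
  · -- degenerate range: A's scan range and B's candidate range are both empty
    rw [sieveLoopA_stop n _ 2 _ (by omega : ¬(2 : Int) * 2 ≤ n)]
    have hL : ((((PySem.List.pyRange 0 (n + 1)).map (fun _ => true)).length : Nat) : Int) - 2 ≤ 2 := by
      rw [List.length_map, PySem.List.length_pyRange_one]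
      omega
    rw [PySem.List.pyRange_one_eq_nil hL, PySem.List.pyRange_one_eq_nil (show n + 1 ≤ 2 by omega)]
    rfl
  · have hn2 : 2 ≤ n := by omega
    simp only [init_eq n]
    have hfold : ∀ (init : List Bool),
        (PySem.List.pyRange 2 (n + 1)).foldl
          (fun fl p =>
            if (decide (p * p < n + 1) && PySem.List.pyGetD fl p true) = true then
              fl.mapIdx (fun k v =>
                if (decide (p * p ≤ (k : Int)) && (PySem.Int.mod ((k : Int) - p * p) p == 0)) = true then false
                else v)
            else fl) init =
        (PySem.List.pyRange 2 (n + 1)).foldl (fun fl p => markB (n + 1) p fl) init :=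
      fun _ => rfl
    rw [hfold, ← loopEq n (n + 1 - 2).toNat 2 (n + 1).toNat _ (le_refl _) (by omega) (by omega)
      (by rw [PySem.List.pyRepeat_singleton, List.length_replicate]; omega)]
    set F := sieveLoopA n (n + 1).toNat 2 (PySem.List.pyRepeat [true] (n + 1)) with hF
    have hlenF : ((F.length : Nat) : Int) = n + 1 := by
      rw [hF, sieveLoopA_length, PySem.List.pyRepeat_singleton, List.length_replicate]
      omega
    set f : Int → Bool := fun i => PySem.List.pyGetD F i false with hf
    -- even flags 4 ≤ k ≤ n are false
    have hEven : ∀ k : Int, 4 ≤ k → k ≤ n → 2 ∣ k → f k = false := by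
      intro k h4 hk h2
      have hsome : F[k.toNat]? = some false := by
        rw [hF]
        exact sieve_even_false n (by omega) k.toNat (by omega) (by omega) (by omega)
      show PySem.List.pyGetD F k false = false
      rw [PySem.List.pyGetD_of_nonneg _ _ (by omega : (0:Int) ≤ k)]
      rw [List.getD_eq_getElem?_getD, hsome]
      rfl
    have H : ∀ i : Int, 2 ≤ i → f i = true → f (i + 1) = true → i + 2 ≤ n → f (i + 2) = false := by
      intro i hi h1 h2 h3
      by_cases h2i : 2 ∣ i
      · exact hEven (i + 2) (by omega) (by omega) (by omega)
      · have := hEven (i + 1) (by omega) (by omega) (by omega)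
        rw [this] at h2
        exact Bool.noConfusion h2
    rw [show ((F.length : Nat) : Int) - 2 = n - 1 by omega]
    rw [PySem.List.foldl_append_if (fun i => f i && f (i + 2)) (fun i => (i, (i + 2)))]
    simp only [List.nil_append, Prod.mk.eta, List.map_id']
    have hs := scan_eq f n H 2 (le_refl 2)
    unfold twinScan primesFrom adjTwins at hs
    exact hs
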